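-- pv_equiv track=rewrite | github.com/bchwast/AGH-WDI | Ćwiczenia 11_12_13/ex_17.py | jedynki
-- ===== SOURCE A (Python) =====
-- def jedynki(key):
--     il_1 = 0
--     while key > 0:
--         if key%2 == 1:
--             il_1 += 1
--         key //= 2
--
--     if il_1%2 == 1:
--         return True
--     return False
-- ===== SOURCE B (Python) =====
-- def jedynki(key):
--     # Kernighan's trick: iterate once per SET bit, clearing the lowest one each time.
--     if key <= 0:
--         return False
--     parity = False
--     while key:
--         parity = not parity
--         key &= key - 1
--     return parity
-- ===== Notes on version B (the rewrite author's own statement) =====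
-- stated objective: alternative
-- what changed: Replaces the per-bit-position divide-and-test loop (and trailing counter parity check) by an early key<=0 guard plus Brian Kernighan's loop that clears the lowest set bit each iteration while toggling a boolean parity flag, so it iterates once per set bit and keeps no counter.
import Mathlib
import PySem

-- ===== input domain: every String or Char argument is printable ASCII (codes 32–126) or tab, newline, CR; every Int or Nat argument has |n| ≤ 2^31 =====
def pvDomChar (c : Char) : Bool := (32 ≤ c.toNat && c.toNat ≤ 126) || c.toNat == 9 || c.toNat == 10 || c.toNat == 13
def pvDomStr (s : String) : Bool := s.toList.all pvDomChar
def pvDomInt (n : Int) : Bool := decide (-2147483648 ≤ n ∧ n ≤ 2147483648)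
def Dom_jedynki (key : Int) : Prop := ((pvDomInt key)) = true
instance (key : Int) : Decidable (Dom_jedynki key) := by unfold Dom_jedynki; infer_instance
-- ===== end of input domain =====

-- B replaces A's per-bit-position division loop by Kernighan's clear-lowest-set-bit loop
-- (one iteration per set bit), guarded by an early `key <= 0` return; return value only.

-- ===== PORT A =====
def jedynkiLoop (key il1 : Int) : Int :=
  if h : key > 0 then
    jedynkiLoop (PySem.Int.floordiv key 2)
      (if PySem.Int.mod key 2 == 1 then il1 + 1 else il1)
  else il1
termination_by key.toNat
decreasing_by
  rw [PySem.Int.floordiv_eq_ediv_of_pos (by omega)]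
  omega

def jedynki (key : Int) : Bool :=
  let il1 := jedynkiLoop key 0
  if PySem.Int.mod il1 2 == 1 then true else false

-- ===== PORT B =====
-- Kernighan loop; since B's guard ensures key > 0 before the loop, the loop runs on a
-- nonnegative int, where Python's `key & (key - 1)` is exactly Nat's `&&&` (PySem.Int.band_natCast).
def kernLoop (n : Nat) (parity : Bool) : Bool :=
  if h : n ≠ 0 then kernLoop (n &&& (n - 1)) (!parity) else parity
termination_by n
decreasing_by
  have hle : n &&& (n - 1) ≤ n - 1 := Nat.and_le_right
  omega

def jedynki_alt (key : Int) : Bool :=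
  if key ≤ 0 then false else kernLoop key.toNat false

-- ===== PRECONDITION & SPEC =====
def Spec_jedynki (key : Int) (out : Bool) : Prop := out = jedynki_alt key
instance (key : Int) (out : Bool) : Decidable (Spec_jedynki key out) := by unfold Spec_jedynki; infer_instance

-- ===== CLAIM (what is proved, stated in full; the proofs are below) =====
def Claim_equal_jedynki : Prop := ∀ (key : Int), Dom_jedynki key → Spec_jedynki key (jedynki key)

-- ===== LEMMAS AND PROOFS =====

-- Reference popcount on Nat.
def pc (n : Nat) : Nat :=
  if h : n = 0 then 0 else n % 2 + pc (n / 2)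
termination_by n
decreasing_by omega

theorem pc_zero : pc 0 = 0 := by simp [pc]

theorem pc_two_mul (m : Nat) : pc (2 * m) = pc m := by
  rcases Nat.eq_zero_or_pos m with h | h
  · subst h; norm_num
  · rw [pc, dif_neg (by omega : 2 * m ≠ 0)]
    rw [Nat.mul_mod_right, Nat.mul_div_cancel_left m (by omega : 0 < 2)]
    omega

theorem pc_two_mul_add_one (m : Nat) : pc (2 * m + 1) = pc m + 1 := by
  rw [pc, dif_neg (by omega : 2 * m + 1 ≠ 0)]
  rw [(by omega : (2 * m + 1) % 2 = 1), (by omega : (2 * m + 1) / 2 = m)]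
  omega

theorem pc_pos (n : Nat) (h : 0 < n) : 0 < pc n := by
  induction n using Nat.strong_induction_on with
  | _ n ih =>
    rw [pc, dif_neg (by omega : n ≠ 0)]
    by_cases hodd : n % 2 = 1
    · omega
    · have := ih (n / 2) (by omega) (by omega)
      omega

-- Clearing the lowest set bit removes exactly one from the popcount.
theorem pc_land_pred (n : Nat) (h : 0 < n) : pc (n &&& (n - 1)) = pc n - 1 := by
  induction n using Nat.strong_induction_on with
  | _ n ih =>
    rcases Nat.even_or_odd n with ⟨m, hm⟩ | ⟨m, hm⟩
    · -- n = 2m even, m > 0 : n &&& (n-1) = 2*(m &&& (m-1))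
      have hm' : 0 < m := by omega
      have hb : n &&& (n - 1) = 2 * (m &&& (m - 1)) := by
        have h1 : n = Nat.bit false m := by simp [Nat.bit_val]; omega
        have h2 : n - 1 = Nat.bit true (m - 1) := by simp [Nat.bit_val]; omega
        rw [h2, h1, Nat.land_bit]
        simp [Nat.bit_val]
      have hn2m : n = 2 * m := by omega
      rw [hb, pc_two_mul, ih m (by omega) hm', hn2m, pc_two_mul]
    · -- n = 2m+1 odd : n &&& (n-1) = 2m
      have hb : n &&& (n - 1) = 2 * m := by
        have h1 : n = Nat.bit true m := by simp [Nat.bit_val]; omega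
        have h2 : n - 1 = Nat.bit false m := by simp [Nat.bit_val]; omega
        rw [h2, h1, Nat.land_bit]
        simp [Nat.bit_val]
      have hn : n = 2 * m + 1 := by omega
      rw [hb, pc_two_mul, hn, pc_two_mul_add_one]
      omega

theorem kernLoop_eq (n : Nat) : ∀ p : Bool, kernLoop n p = xor p (decide (pc n % 2 = 1)) := by
  induction n using Nat.strong_induction_on with
  | _ n ih =>
    intro p
    unfold kernLoop
    by_cases h : n = 0
    · simp [h, pc_zero]
    · have hlt : n &&& (n - 1) < n := by
        have hle : n &&& (n - 1) ≤ n - 1 := Nat.and_le_right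
        omega
      rw [dif_pos h, ih _ hlt]
      have h1 := pc_land_pred n (by omega)
      have h2 := pc_pos n (by omega)
      rw [h1]
      rcases Nat.mod_two_eq_zero_or_one (pc n) with hq | hq
      · have hq' : (pc n - 1) % 2 = 1 := by omega
        rw [hq, hq']; cases p <;> simp
      · have hq' : (pc n - 1) % 2 = 0 := by omega
        rw [hq, hq']; cases p <;> simp

theorem jedynkiLoop_eq (n : Nat) : ∀ il1 : Int, jedynkiLoop (n : Int) il1 = il1 + (pc n : Int) := by
  induction n using Nat.strong_induction_on with
  | _ n ih =>
    intro il1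
    rw [jedynkiLoop.eq_def]
    by_cases h : n = 0
    · simp [h, pc_zero]
    · have hpos : (0 : Int) < (n : Int) := by exact_mod_cast Nat.pos_of_ne_zero h
      rw [dif_pos hpos]
      have hf : PySem.Int.floordiv (n : Int) 2 = ((n / 2 : Nat) : Int) := by
        exact_mod_cast PySem.Int.floordiv_natCast n 2
      have hm2 : PySem.Int.mod (n : Int) 2 = ((n % 2 : Nat) : Int) := by
        exact_mod_cast PySem.Int.mod_natCast n 2
      have hpc : pc n = n % 2 + pc (n / 2) := by rw [pc, dif_neg h]
      rw [hf, hm2, ih (n / 2) (by omega), hpc]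
      by_cases hodd : n % 2 = 1
      · rw [hodd]; norm_num; ring
      · have h0 : n % 2 = 0 := by omega
        rw [h0]; norm_num

theorem jedynkiLoop_nonpos (key il1 : Int) (h : ¬ key > 0) : jedynkiLoop key il1 = il1 := by
  rw [jedynkiLoop.eq_def, dif_neg h]

-- ===== VERDICT (by name: the statement is the Claim_ definition above) =====
theorem jedynki_spec : Claim_equal_jedynki := by
  intro key _
  unfold Spec_jedynki
  show (if PySem.Int.mod (jedynkiLoop key 0) 2 == 1 then true else false) = jedynki_alt key
  unfold jedynki_alt
  by_cases h : key ≤ 0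
  · rw [jedynkiLoop_nonpos key 0 (by omega), if_pos h]
    simp [PySem.Int.mod]
  · have hk : key = ((key.toNat : Nat) : Int) := by omega
    have hloop : jedynkiLoop key 0 = ((pc key.toNat : Nat) : Int) := by
      calc jedynkiLoop key 0 = jedynkiLoop ((key.toNat : Nat) : Int) 0 := by rw [← hk]
        _ = 0 + ((pc key.toNat : Nat) : Int) := jedynkiLoop_eq key.toNat 0
        _ = _ := by ring
    have hm : PySem.Int.mod ((pc key.toNat : Nat) : Int) 2 = ((pc key.toNat % 2 : Nat) : Int) := by
      exact_mod_cast PySem.Int.mod_natCast (pc key.toNat) 2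
    rw [hloop, hm, if_neg h, kernLoop_eq]
    rcases Nat.mod_two_eq_zero_or_one (pc key.toNat) with h2 | h2 <;> rw [h2] <;> simp
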